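-- pv_equiv track=rewrite | github.com/aburhan/gke-metric-exporter | gke_export_cli/utils/fetch_startup_time.py | extract_status_conditions
-- ===== SOURCE A (Python) =====
-- def extract_status_conditions(conditions):
--     """
--     Extracts the 'PodScheduled' and 'Ready' conditions and their lastTransitionTime from a list of conditions.
--
--     Parameters:
--     - conditions (list): A list of status conditions.
--
--     Returns:
--     - dict: A dictionary with 'PodScheduled' and 'Ready' statuses and lastTransitionTimes.
--     """
--     status_conditions = {
--         'PodScheduled_lastTransitionTime': 'Unknown',
--         'Ready_lastTransitionTime': 'Unknown'
--     }
--
--     for condition in conditions: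
--         if condition['type'] == 'PodScheduled':
--             status_conditions['PodScheduled_lastTransitionTime'] = condition.get('lastTransitionTime', 'Unknown')
--         elif condition['type'] == 'Ready':
--             status_conditions['Ready_lastTransitionTime'] = condition.get('lastTransitionTime', 'Unknown')
--
--     return status_conditions
-- ===== SOURCE B (Python) =====
-- def extract_status_conditions(conditions):
--     # Backwards search with early exit: for each wanted type, scan the
--     # conditions in reverse and return the first (i.e. last in original
--     # order) matching condition's lastTransitionTime, else 'Unknown'.
--     def last_time(ty):
--         for c in reversed(conditions):
--             if c['type'] == ty:
--                 return c.get('lastTransitionTime', 'Unknown')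
--         return 'Unknown'
--     return {
--         'PodScheduled_lastTransitionTime': last_time('PodScheduled'),
--         'Ready_lastTransitionTime': last_time('Ready'),
--     }
-- ===== Notes on version B (the rewrite author's own statement) =====
-- stated objective: alternative
-- what changed: Replaces the single forward pass that mutates two result slots with two staged backwards searches, each scanning the reversed list and returning early at the first (= last in original order) condition of the wanted type.
import Mathlib
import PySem

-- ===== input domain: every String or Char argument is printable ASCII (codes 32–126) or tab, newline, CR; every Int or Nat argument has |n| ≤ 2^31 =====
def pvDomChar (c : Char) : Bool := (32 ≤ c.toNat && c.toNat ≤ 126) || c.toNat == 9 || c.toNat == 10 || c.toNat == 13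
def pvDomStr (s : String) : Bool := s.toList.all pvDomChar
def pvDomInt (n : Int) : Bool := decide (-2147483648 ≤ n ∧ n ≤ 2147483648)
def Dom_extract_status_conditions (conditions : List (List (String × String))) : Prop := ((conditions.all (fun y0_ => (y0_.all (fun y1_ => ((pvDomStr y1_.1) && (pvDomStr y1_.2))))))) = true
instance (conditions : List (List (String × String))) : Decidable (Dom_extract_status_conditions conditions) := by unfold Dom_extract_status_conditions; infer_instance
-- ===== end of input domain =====

-- B replaces A's forward pass mutating two slots by two staged backwards searches with early exit.
-- ===== PORT A =====
-- A's loop: result dict starts with the two keys; condition['type'] may raise KeyError (none).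
def escLoopA : List (List (String × String)) → PySem.Dict String String → Option (PySem.Dict String String)
  | [], d => some d
  | c :: rest, d =>
    match (PySem.Dict.mk c).get? "type" with
    | none => none
    | some t =>
      if t = "PodScheduled" then
        escLoopA rest (d.insert "PodScheduled_lastTransitionTime" ((PySem.Dict.mk c).getD "lastTransitionTime" "Unknown"))
      else if t = "Ready" then
        escLoopA rest (d.insert "Ready_lastTransitionTime" ((PySem.Dict.mk c).getD "lastTransitionTime" "Unknown"))
      else escLoopA rest d

def extract_status_conditions (conditions : List (List (String × String))) : List (String × String) :=
  match escLoopA conditions ((PySem.Dict.empty.insert "PodScheduled_lastTransitionTime" "Unknown").insert "Ready_lastTransitionTime" "Unknown") with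
  | some d => d.items
  | none => []   -- unreachable under Pre_ (Python raises KeyError here)

-- ===== PORT B =====
-- B's last_time: scan the reversed list, return at the first condition of type `ty`
-- (c['type'] may raise KeyError = none, which propagates).
def lastTimeB (ty : String) : List (List (String × String)) → Option String
  | [] => some "Unknown"
  | c :: rest =>
    match (PySem.Dict.mk c).get? "type" with
    | none => none
    | some t =>
      if t = ty then some ((PySem.Dict.mk c).getD "lastTransitionTime" "Unknown")
      else lastTimeB ty rest

def extract_status_conditions_alt (conditions : List (List (String × String))) : List (String × String) :=
  match lastTimeB "PodScheduled" conditions.reverse with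
  | none => []   -- unreachable under Pre_ (Python raises KeyError here)
  | some p =>
    match lastTimeB "Ready" conditions.reverse with
    | none => []
    | some r => [("PodScheduled_lastTransitionTime", p), ("Ready_lastTransitionTime", r)]

-- ===== PRECONDITION & SPEC =====
-- Pre_ excludes exactly the inputs where A raises KeyError: a condition without a 'type' key.
def Pre_extract_status_conditions (conditions : List (List (String × String))) : Prop :=
  ∀ c ∈ conditions, "type" ∈ c.map Prod.fst
instance (conditions : List (List (String × String))) : Decidable (Pre_extract_status_conditions conditions) := by unfold Pre_extract_status_conditions; infer_instance

def pvWitness_extract_status_conditions : (List (List (String × String))) :=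
  [[("type", "PodScheduled"), ("lastTransitionTime", "2024-01-01")], [("type", "Ready")]]

def Spec_extract_status_conditions (conditions : List (List (String × String))) (out : List (String × String)) : Prop := out = extract_status_conditions_alt conditions
instance (conditions : List (List (String × String))) (out : List (String × String)) : Decidable (Spec_extract_status_conditions conditions out) := by unfold Spec_extract_status_conditions; infer_instance

-- ===== CLAIM (what is proved, stated in full; the proofs are below) =====
def Claim_equal_extract_status_conditions : Prop := ∀ (conditions : List (List (String × String))), Dom_extract_status_conditions conditions → Pre_extract_status_conditions conditions → Spec_extract_status_conditions conditions (extract_status_conditions conditions)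

-- ===== LEMMAS AND PROOFS =====

-- the value A's loop leaves in slot `ty` (last match wins, fold forwards)
def escVal (ty : String) (conds : List (List (String × String))) (cur : String) : String :=
  conds.foldl (fun v c => if (PySem.Dict.mk c).getD "type" "" = ty then (PySem.Dict.mk c).getD "lastTransitionTime" "Unknown" else v) cur

-- the last match of `ty` as an option (fold forwards)
def escLast (ty : String) (conds : List (List (String × String))) (acc : Option String) : Option String :=
  conds.foldl (fun a c => if (PySem.Dict.mk c).getD "type" "" = ty then some ((PySem.Dict.mk c).getD "lastTransitionTime" "Unknown") else a) acc

-- the first match of `ty` (structural, front to back)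
def escFirst (ty : String) : List (List (String × String)) → Option String
  | [] => none
  | c :: rest =>
    if (PySem.Dict.mk c).getD "type" "" = ty then some ((PySem.Dict.mk c).getD "lastTransitionTime" "Unknown")
    else escFirst ty rest

lemma esc_get_type {c : List (String × String)} (h : "type" ∈ c.map Prod.fst) :
    (PySem.Dict.mk c).get? "type" = some ((PySem.Dict.mk c).getD "type" "") := by
  have h1 : (PySem.Dict.mk c).get? "type" ≠ none := by
    intro hn
    rw [PySem.Dict.get?_eq_none_iff_not_mem_keys] at hn
    exact hn (by simpa [PySem.Dict.keys] using h)
  obtain ⟨v, hv⟩ := Option.ne_none_iff_exists'.mp h1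
  rw [hv, PySem.Dict.getD_eq_get?_getD, hv]
  rfl

lemma escLoopA_eq (conds : List (List (String × String))) (p r : String)
    (h : ∀ c ∈ conds, "type" ∈ c.map Prod.fst) :
    escLoopA conds (PySem.Dict.mk [("PodScheduled_lastTransitionTime", p), ("Ready_lastTransitionTime", r)]) =
      some (PySem.Dict.mk [("PodScheduled_lastTransitionTime", escVal "PodScheduled" conds p),
                           ("Ready_lastTransitionTime", escVal "Ready" conds r)]) := by
  induction conds generalizing p r with
  | nil => rfl
  | cons c rest ih =>
    have hc := h c (by simp)
    have hrest : ∀ c' ∈ rest, "type" ∈ c'.map Prod.fst := fun c' hm => h c' (by simp [hm])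
    simp only [escLoopA, esc_get_type hc]
    by_cases h1 : (PySem.Dict.mk c).getD "type" "" = "PodScheduled"
    · rw [if_pos h1]
      have e : (PySem.Dict.mk [("PodScheduled_lastTransitionTime", p), ("Ready_lastTransitionTime", r)]).insert
            "PodScheduled_lastTransitionTime" ((PySem.Dict.mk c).getD "lastTransitionTime" "Unknown")
          = PySem.Dict.mk [("PodScheduled_lastTransitionTime", (PySem.Dict.mk c).getD "lastTransitionTime" "Unknown"),
                           ("Ready_lastTransitionTime", r)] := rfl
      rw [e, ih _ r hrest]
      simp [escVal, List.foldl, h1]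
    · rw [if_neg h1]
      by_cases h2 : (PySem.Dict.mk c).getD "type" "" = "Ready"
      · rw [if_pos h2]
        have e : (PySem.Dict.mk [("PodScheduled_lastTransitionTime", p), ("Ready_lastTransitionTime", r)]).insert
              "Ready_lastTransitionTime" ((PySem.Dict.mk c).getD "lastTransitionTime" "Unknown")
            = PySem.Dict.mk [("PodScheduled_lastTransitionTime", p),
                             ("Ready_lastTransitionTime", (PySem.Dict.mk c).getD "lastTransitionTime" "Unknown")] := rfl
        rw [e, ih p _ hrest]
        simp [escVal, List.foldl, h2]
      · rw [if_neg h2, ih p r hrest]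
        simp [escVal, List.foldl, h1, h2]

-- escVal is escLast read off with a default
lemma escVal_eq_escLast (ty : String) (conds : List (List (String × String))) :
    ∀ (cur : String) (acc : Option String),
      escVal ty conds (acc.getD cur) = (escLast ty conds acc).getD cur := by
  induction conds with
  | nil => intro cur acc; simp [escVal, escLast]
  | cons c rest ih =>
    intro cur acc
    simp only [escVal, escLast, List.foldl] at *
    by_cases hm : (PySem.Dict.mk c).getD "type" "" = ty
    · rw [if_pos hm, if_pos hm]
      exact ih cur (some ((PySem.Dict.mk c).getD "lastTransitionTime" "Unknown"))
    · rw [if_neg hm, if_neg hm]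
      exact ih cur acc

lemma escFirst_append (ty : String) (xs ys : List (List (String × String))) :
    escFirst ty (xs ++ ys) = (escFirst ty xs).orElse (fun _ => escFirst ty ys) := by
  induction xs with
  | nil => simp [escFirst]
  | cons c rest ih =>
    by_cases hm : (PySem.Dict.mk c).getD "type" "" = ty
    · simp [escFirst, hm]
    · simp [escFirst, hm, ih]

-- the last match (fold forwards) is the first match of the reversed list
lemma escLast_eq_escFirst_reverse (ty : String) (conds : List (List (String × String))) :
    ∀ acc : Option String, escLast ty conds acc = (escFirst ty conds.reverse).orElse (fun _ => acc) := by
  induction conds with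
  | nil => intro acc; simp [escLast, escFirst]
  | cons c rest ih =>
    intro acc
    simp only [escLast, List.foldl] at *
    rw [ih, List.reverse_cons, escFirst_append]
    by_cases hm : (PySem.Dict.mk c).getD "type" "" = ty
    · cases escFirst ty rest.reverse <;> simp [escFirst, hm, Option.orElse]
    · cases escFirst ty rest.reverse <;> simp [escFirst, hm, Option.orElse]

-- B's search computes the first match (with default "Unknown") when every condition has a type
lemma lastTimeB_eq_escFirst (ty : String) (m : List (List (String × String)))
    (h : ∀ c ∈ m, "type" ∈ c.map Prod.fst) :
    lastTimeB ty m = some ((escFirst ty m).getD "Unknown") := by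
  induction m with
  | nil => rfl
  | cons c rest ih =>
    have hc := h c (by simp)
    have hrest : ∀ c' ∈ rest, "type" ∈ c'.map Prod.fst := fun c' hm => h c' (by simp [hm])
    simp only [lastTimeB, esc_get_type hc, escFirst]
    by_cases hm : (PySem.Dict.mk c).getD "type" "" = ty
    · simp [hm]
    · simp [hm, ih hrest]

lemma lastTimeB_eq_escVal (ty : String) (conds : List (List (String × String)))
    (h : ∀ c ∈ conds, "type" ∈ c.map Prod.fst) :
    lastTimeB ty conds.reverse = some (escVal ty conds "Unknown") := by
  have hrev : ∀ c ∈ conds.reverse, "type" ∈ c.map Prod.fst := fun c hm => h c (List.mem_reverse.mp hm)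
  have h0 : escVal ty conds "Unknown" = (escLast ty conds none).getD "Unknown" :=
    escVal_eq_escLast ty conds "Unknown" none
  rw [lastTimeB_eq_escFirst ty conds.reverse hrev, h0,
      escLast_eq_escFirst_reverse ty conds none]
  cases escFirst ty conds.reverse <;> rfl

-- ===== VERDICT (by name: the statement is the Claim_ definition above) =====
theorem extract_status_conditions_spec : Claim_equal_extract_status_conditions := by
  intro conds _ hpre
  unfold Spec_extract_status_conditions extract_status_conditions extract_status_conditions_alt
  rw [show ((PySem.Dict.empty.insert "PodScheduled_lastTransitionTime" "Unknown").insert "Ready_lastTransitionTime" "Unknown")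
        = PySem.Dict.mk [("PodScheduled_lastTransitionTime", "Unknown"), ("Ready_lastTransitionTime", "Unknown")] from rfl]
  rw [escLoopA_eq conds "Unknown" "Unknown" hpre,
      lastTimeB_eq_escVal "PodScheduled" conds hpre,
      lastTimeB_eq_escVal "Ready" conds hpre]
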